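-- pv_equiv track=rewrite | github.com/warewe-raunit/DAAP | daap/executor/context_manager.py | _priority_trim_lines
-- ===== SOURCE A (Python) =====
-- def _priority_trim_lines(text: str, max_chars: int = 200, max_lines: int = 4) -> str:
--     """
--     Select highest-priority lines from text within budget (claw-code pattern).
--
--     Priority tiers:
--       0 — summary/scope/task/status headers
--       1 — section headers ending with ':'
--       2 — bullet points
--       3 — everything else
--
--     Returns a single-line summary for use inside a larger context summary.
--     """
--     raw = [l.strip() for l in text.splitlines() if l.strip()]
--     # Deduplicate (case-insensitive)
--     seen: set[str] = set()
--     lines: list[str] = []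
--     for l in raw:
--         key = l.lower()
--         if key not in seen:
--             seen.add(key)
--             lines.append(l[:160])  # claw-code: max 160 chars per line
--
--     def _priority(line: str) -> int:
--         s = line.lower()
--         if any(kw in s for kw in ("summary:", "scope:", "task:", "status:", "current work:")):
--             return 0
--         if s.endswith(":") and len(s) < 80:
--             return 1
--         if line.startswith(("- ", "• ", "* ")):
--             return 2
--         return 3
--
--     ranked = sorted(range(len(lines)), key=lambda i: (_priority(lines[i]), i))
--     selected: list[int] = []
--     chars = 0
--     for idx in ranked:
--         line = lines[idx]
--         if chars + len(line) > max_chars or len(selected) >= max_lines: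
--             break
--         selected.append(idx)
--         chars += len(line)
--
--     selected_sorted = sorted(selected)
--     return " | ".join(lines[i] for i in selected_sorted) if selected_sorted else lines[0][:max_chars]
-- ===== SOURCE B (Python) =====
-- def _priority_trim_lines(text: str, max_chars: int = 200, max_lines: int = 4) -> str:
--     """Bucket (counting-sort) variant: one pass dedup, one priority computation
--     per line, four priority buckets instead of a comparison sort."""
--     seen = set()
--     lines = []
--     for l0 in text.splitlines():
--         l = l0.strip()
--         if not l:
--             continue
--         key = l.lower()
--         if key not in seen:
--             seen.add(key)
--             lines.append(l[:160])
--
--     buckets = ([], [], [], [])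
--     for i, line in enumerate(lines):
--         buckets[_priority(line)].append(i)
--     ranked = buckets[0] + buckets[1] + buckets[2] + buckets[3]
--
--     selected = []
--     chars = 0
--     for idx in ranked:
--         line = lines[idx]
--         if chars + len(line) > max_chars or len(selected) >= max_lines:
--             break
--         selected.append(idx)
--         chars += len(line)
--
--     selected_sorted = sorted(selected)
--     return " | ".join(lines[i] for i in selected_sorted) if selected_sorted else lines[0][:max_chars]
--
--
-- def _priority(line: str) -> int:
--     s = line.lower()
--     if any(kw in s for kw in ("summary:", "scope:", "task:", "status:", "current work:")):
--         return 0
--     if s.endswith(":") and len(s) < 80: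
--         return 1
--     if line.startswith(("- ", "• ", "* ")):
--         return 2
--     return 3
-- ===== Notes on version B (the rewrite author's own statement) =====
-- stated objective: alternative
-- what changed: Replaces the comparison sort over indices keyed by (priority, i) with a single-pass counting sort into four priority buckets (priority computed once per line), and fuses the strip/filter comprehension with the dedup loop into one pass.
import Mathlib
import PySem

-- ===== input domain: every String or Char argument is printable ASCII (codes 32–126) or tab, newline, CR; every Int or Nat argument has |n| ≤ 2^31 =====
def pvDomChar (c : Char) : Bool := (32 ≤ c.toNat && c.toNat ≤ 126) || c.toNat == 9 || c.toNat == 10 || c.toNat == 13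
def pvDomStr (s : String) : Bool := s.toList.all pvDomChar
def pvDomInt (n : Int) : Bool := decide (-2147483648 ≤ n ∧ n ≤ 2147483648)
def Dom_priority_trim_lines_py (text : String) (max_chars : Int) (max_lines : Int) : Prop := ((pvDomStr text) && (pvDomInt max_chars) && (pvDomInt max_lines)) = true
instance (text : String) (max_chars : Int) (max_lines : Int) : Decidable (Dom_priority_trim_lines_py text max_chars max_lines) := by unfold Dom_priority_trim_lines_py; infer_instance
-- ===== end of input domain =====

-- B replaces A's comparison sort keyed by (priority, index) with a one-pass
-- four-bucket counting sort (priority computed once per line) and fuses the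
-- strip/filter comprehension with the dedup loop; return values proved equal.


-- ===== PORT A =====
-- shared helper: the nested `_priority` function (identical in both Pythons)
def pvPrio (line : List Char) : Int :=
  let s := PySem.Chars.lower line
  if PySem.Chars.isIn "summary:".toList s || PySem.Chars.isIn "scope:".toList s ||
     PySem.Chars.isIn "task:".toList s || PySem.Chars.isIn "status:".toList s ||
     PySem.Chars.isIn "current work:".toList s then 0
  else if PySem.Chars.endswith s ":".toList && decide ((s.length : Int) < 80) then 1
  else if PySem.Chars.startswith line "- ".toList || PySem.Chars.startswith line "• ".toList ||
          PySem.Chars.startswith line "* ".toList then 2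
  else 3

-- shared helper: the greedy selection loop over `ranked` (identical in both Pythons)
def pvSelect (lines : List (List Char)) (ranked : List Int) (max_chars max_lines : Int) : List Int :=
  (ranked.foldl (fun (st : List Int × Int × Bool) idx =>
    if st.2.2 then st else
    let line := PySem.List.pyGetD lines idx []
    if decide (max_chars < st.2.1 + (line.length : Int)) || decide (max_lines ≤ (st.1.length : Int))
    then (st.1, st.2.1, true)
    else (st.1 ++ [idx], st.2.1 + (line.length : Int), false)) ([], 0, false)).1

-- shared helper: sort selected, join with " | ", or the lines[0][:max_chars] fallback
-- (when `lines = []` the Python raises IndexError: excluded by Pre_, "" returned here)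
def pvRender (lines : List (List Char)) (selected : List Int) (max_chars : Int) : String :=
  let ss := PySem.List.sorted selected (fun i => i)
  match ss, lines with
  | [], [] => ""
  | [], l :: _ => String.ofList (PySem.List.slice l none (some max_chars))
  | _ :: _, _ => String.ofList (PySem.Chars.join " | ".toList (ss.map (fun i => PySem.List.pyGetD lines i [])))

-- A: comprehension producing `raw`, then the dedup loop
def pvLinesA (text : String) : List (List Char) :=
  let raw := (PySem.Chars.splitlines text.toList).filterMap
    (fun l => let s := PySem.Chars.strip l; if s = [] then none else some s)
  (raw.foldl (fun (st : PySem.Set (List Char) × List (List Char)) l =>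
    let key := PySem.Chars.lower l
    if PySem.Set.contains st.1 key then st
    else (PySem.Set.add st.1 key, st.2 ++ [PySem.List.slice l none (some 160)]))
    (PySem.Set.empty, [])).2

def priority_trim_lines_py (text : String) (max_chars : Int) (max_lines : Int) : String :=
  let lines := pvLinesA text
  let ranked := PySem.List.sorted2 (PySem.List.pyRange 0 (lines.length : Int) 1)
    (fun i => pvPrio (PySem.List.pyGetD lines i [])) (fun i => i)
  pvRender lines (pvSelect lines ranked max_chars max_lines) max_chars

-- ===== PORT B =====
-- B: one fused loop doing strip / blank-skip / dedup
def pvLinesB (text : String) : List (List Char) :=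
  ((PySem.Chars.splitlines text.toList).foldl
    (fun (st : PySem.Set (List Char) × List (List Char)) l0 =>
      let l := PySem.Chars.strip l0
      if l = [] then st else
      let key := PySem.Chars.lower l
      if PySem.Set.contains st.1 key then st
      else (PySem.Set.add st.1 key, st.2 ++ [PySem.List.slice l none (some 160)]))
    (PySem.Set.empty, [])).2

-- B: one pass appending each index to its priority bucket
def pvBuckets (lines : List (List Char)) : List Int × List Int × List Int × List Int :=
  (PySem.List.enumerate lines).foldl (fun b p =>
    let pr := pvPrio p.2
    (if pr = 0 then b.1 ++ [p.1] else b.1,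
     if pr = 1 then b.2.1 ++ [p.1] else b.2.1,
     if pr = 2 then b.2.2.1 ++ [p.1] else b.2.2.1,
     if pr = 3 then b.2.2.2 ++ [p.1] else b.2.2.2)) ([], [], [], [])

def priority_trim_lines_py_alt (text : String) (max_chars : Int) (max_lines : Int) : String :=
  let lines := pvLinesB text
  let b := pvBuckets lines
  let ranked := b.1 ++ b.2.1 ++ b.2.2.1 ++ b.2.2.2
  pvRender lines (pvSelect lines ranked max_chars max_lines) max_chars

-- ===== PRECONDITION & SPEC =====
-- Pre_ excludes texts with no non-blank line: there A's final `lines[0]` fallback raises IndexError (B raises too).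
def Pre_priority_trim_lines_py (text : String) (max_chars : Int) (max_lines : Int) : Prop :=
  (PySem.Chars.splitlines text.toList).any (fun l => PySem.Chars.strip l ≠ []) = true
instance (text : String) (max_chars : Int) (max_lines : Int) : Decidable (Pre_priority_trim_lines_py text max_chars max_lines) := by unfold Pre_priority_trim_lines_py; infer_instance
def pvWitness_priority_trim_lines_py : String × Int × Int := ("Task: fix\n- item one\nnotes:", 30, 2)

def Spec_priority_trim_lines_py (text : String) (max_chars : Int) (max_lines : Int) (out : String) : Prop := out = priority_trim_lines_py_alt text max_chars max_lines
instance (text : String) (max_chars : Int) (max_lines : Int) (out : String) : Decidable (Spec_priority_trim_lines_py text max_chars max_lines out) := by unfold Spec_priority_trim_lines_py; infer_instance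

-- ===== CLAIM (what is proved, stated in full; the proofs are below) =====
def Claim_equal_priority_trim_lines_py : Prop := ∀ (text : String) (max_chars : Int) (max_lines : Int), Dom_priority_trim_lines_py text max_chars max_lines → Pre_priority_trim_lines_py text max_chars max_lines → Spec_priority_trim_lines_py text max_chars max_lines (priority_trim_lines_py text max_chars max_lines)

-- ===== LEMMAS AND PROOFS =====

theorem prio_cases (l : List Char) : pvPrio l = 0 ∨ pvPrio l = 1 ∨ pvPrio l = 2 ∨ pvPrio l = 3 := by
  unfold pvPrio
  simp only [Bool.or_eq_true, Bool.and_eq_true, decide_eq_true_eq]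
  split_ifs <;> simp

-- B's bucket loop collects, per priority value, the index range filtered to that priority
theorem buckets_eq (lines : List (List Char)) :
    pvBuckets lines =
      ((PySem.List.pyRange 0 (lines.length : Int) 1).filter (fun i => decide (pvPrio (PySem.List.pyGetD lines i []) = 0)),
       (PySem.List.pyRange 0 (lines.length : Int) 1).filter (fun i => decide (pvPrio (PySem.List.pyGetD lines i []) = 1)),
       (PySem.List.pyRange 0 (lines.length : Int) 1).filter (fun i => decide (pvPrio (PySem.List.pyGetD lines i []) = 2)),
       (PySem.List.pyRange 0 (lines.length : Int) 1).filter (fun i => decide (pvPrio (PySem.List.pyGetD lines i []) = 3))) := by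
  unfold pvBuckets
  rw [PySem.List.enumerate_eq_map_pyRange lines [], List.foldl_map]
  simp only []
  rw [PySem.List.foldl_prod_mk
      (f := fun s j => if pvPrio (PySem.List.pyGetD lines j []) = 0 then s ++ [j] else s)
      (g := fun s j =>
        (if pvPrio (PySem.List.pyGetD lines j []) = 1 then s.1 ++ [j] else s.1,
         if pvPrio (PySem.List.pyGetD lines j []) = 2 then s.2.1 ++ [j] else s.2.1,
         if pvPrio (PySem.List.pyGetD lines j []) = 3 then s.2.2 ++ [j] else s.2.2))]
  rw [PySem.List.foldl_prod_mk
      (f := fun s j => if pvPrio (PySem.List.pyGetD lines j []) = 1 then s ++ [j] else s)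
      (g := fun s j =>
        (if pvPrio (PySem.List.pyGetD lines j []) = 2 then s.1 ++ [j] else s.1,
         if pvPrio (PySem.List.pyGetD lines j []) = 3 then s.2 ++ [j] else s.2))]
  rw [PySem.List.foldl_prod_mk
      (f := fun s j => if pvPrio (PySem.List.pyGetD lines j []) = 2 then s ++ [j] else s)
      (g := fun s j => if pvPrio (PySem.List.pyGetD lines j []) = 3 then s ++ [j] else s)]
  simp only [PySem.List.foldl_append_ite_eq_filter, List.nil_append, PySem.List.len]

-- sorted2 with Int keys is `sorted` with the lexicographic pair key
theorem sorted2_eq_sorted_lex {α : Type} (xs : List α) (k1 k2 : α → Int) :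
    PySem.List.sorted2 xs k1 k2 = PySem.List.sorted xs (fun x => toLex (k1 x, k2 x)) := by
  rw [PySem.List.sorted_eq_foldl_insertBy]
  unfold PySem.List.sorted2
  simp only []
  congr 1
  funext acc x
  congr 1
  funext a b
  rcases lt_trichotomy (k1 a) (k1 b) with h | h | h <;>
    simp [Prod.Lex.toLex_lt_toLex, h, not_lt_of_gt]

theorem filter_partition_perm {α : Type} (P : α → Int) (R : List α)
    (h : ∀ i ∈ R, P i = 0 ∨ P i = 1 ∨ P i = 2 ∨ P i = 3) :
    (R.filter (fun i => decide (P i = 0)) ++ R.filter (fun i => decide (P i = 1)) ++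
     R.filter (fun i => decide (P i = 2)) ++ R.filter (fun i => decide (P i = 3))).Perm R := by
  induction R with
  | nil => simp
  | cons a t ih =>
    have ht : ∀ i ∈ t, P i = 0 ∨ P i = 1 ∨ P i = 2 ∨ P i = 3 :=
      fun i hi => h i (List.mem_cons_of_mem a hi)
    rcases h a (List.mem_cons_self) with ha | ha | ha | ha <;>
      simp only [List.filter_cons, ha, decide_eq_true_eq] <;> norm_num
    · simpa [List.append_assoc] using ih ht
    · refine List.perm_middle.trans (List.Perm.cons a ?_)
      simpa [List.append_assoc] using ih ht
    · rw [← List.append_assoc]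
      refine List.perm_middle.trans (List.Perm.cons a ?_)
      simpa [List.append_assoc] using ih ht
    · rw [← List.append_assoc, ← List.append_assoc]
      refine List.perm_middle.trans (List.Perm.cons a ?_)
      simpa [List.append_assoc] using ih ht

-- the four blocks are strictly increasing under the key i ↦ (P i, i)
theorem pairwise_key_blocks (P : Int → Int) (R : List Int) (hR : R.Pairwise (· < ·)) :
    (R.filter (fun i => decide (P i = 0)) ++ R.filter (fun i => decide (P i = 1)) ++
     R.filter (fun i => decide (P i = 2)) ++ R.filter (fun i => decide (P i = 3))).Pairwise
      (fun a b => (toLex (P a, a) : Lex (Int × Int)) < toLex (P b, b)) := by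
  have block : ∀ k : Int, (R.filter (fun i => decide (P i = k))).Pairwise
      (fun a b => (toLex (P a, a) : Lex (Int × Int)) < toLex (P b, b)) := by
    intro k
    refine List.Pairwise.imp_of_mem ?_ (hR.filter _)
    intro a b ha hb hab
    have hpa := (List.mem_filter.mp ha).2
    have hpb := (List.mem_filter.mp hb).2
    simp only [decide_eq_true_eq] at hpa hpb
    exact Prod.Lex.toLex_lt_toLex.mpr (Or.inr ⟨by rw [hpa, hpb], hab⟩)
  have cross : ∀ j k : Int, j < k → ∀ a ∈ R.filter (fun i => decide (P i = j)),
      ∀ b ∈ R.filter (fun i => decide (P i = k)),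
      (toLex (P a, a) : Lex (Int × Int)) < toLex (P b, b) := by
    intro j k hjk a ha b hb
    have hpa := (List.mem_filter.mp ha).2
    have hpb := (List.mem_filter.mp hb).2
    simp only [decide_eq_true_eq] at hpa hpb
    exact Prod.Lex.toLex_lt_toLex.mpr (Or.inl (by rw [hpa, hpb]; exact hjk))
  rw [List.pairwise_append, List.pairwise_append, List.pairwise_append]
  refine ⟨⟨⟨block 0, block 1, cross 0 1 (by norm_num)⟩, block 2, ?_⟩, block 3, ?_⟩
  · intro a ha b hb
    rcases List.mem_append.mp ha with h' | h'
    · exact cross 0 2 (by norm_num) a h' b hb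
    · exact cross 1 2 (by norm_num) a h' b hb
  · intro a ha b hb
    rcases List.mem_append.mp ha with h' | h'
    · rcases List.mem_append.mp h' with h'' | h''
      · exact cross 0 3 (by norm_num) a h'' b hb
      · exact cross 1 3 (by norm_num) a h'' b hb
    · exact cross 2 3 (by norm_num) a h' b hb

-- the bucket concatenation equals A's stable sort by (priority, index)
theorem pvRanked_eq (lines : List (List Char)) :
    PySem.List.sorted2 (PySem.List.pyRange 0 (lines.length : Int) 1)
      (fun i => pvPrio (PySem.List.pyGetD lines i [])) (fun i => i)
    = (pvBuckets lines).1 ++ (pvBuckets lines).2.1 ++ (pvBuckets lines).2.2.1 ++ (pvBuckets lines).2.2.2 := by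
  rw [sorted2_eq_sorted_lex, buckets_eq]
  exact PySem.List.sorted_eq_of_perm_of_pairwise_lt _ _ _
    (filter_partition_perm _ _ (fun i _ => prio_cases (PySem.List.pyGetD lines i [])))
    (pairwise_key_blocks _ _ (PySem.List.pairwise_lt_pyRange_one 0 _))

-- A's comprehension-then-dedup loop equals B's fused loop, for any loop body g
theorem foldl_filterMap_strip {σ : Type} (g : σ → List Char → σ) (xs : List (List Char)) (st : σ) :
    ((xs.filterMap (fun l => let s := PySem.Chars.strip l; if s = [] then none else some s)).foldl g st)
    = xs.foldl (fun st l0 => let l := PySem.Chars.strip l0; if l = [] then st else g st l) st := by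
  induction xs generalizing st with
  | nil => rfl
  | cons a t ih =>
    by_cases h : PySem.Chars.strip a = [] <;> simp [h, ih]

theorem pvLines_eq (text : String) : pvLinesA text = pvLinesB text := by
  exact congrArg Prod.snd (foldl_filterMap_strip _ _ _)

-- ===== VERDICT (by name: the statement is the Claim_ definition above) =====
theorem priority_trim_lines_py_spec : Claim_equal_priority_trim_lines_py := by
  intro text max_chars max_lines _hdom _hpre
  unfold Spec_priority_trim_lines_py priority_trim_lines_py priority_trim_lines_py_alt
  simp only [pvLines_eq, pvRanked_eq, List.append_assoc]
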